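-- pv_equiv track=rewrite | github.com/AwesomeHuang/BAClassifier | address_graph_construction/multi.py | transverse
-- ===== SOURCE A (Python) =====
-- from collections import defaultdict,Counter
--
-- def transverse(address_tx):
--
--     adds_vals = defaultdict(list)
--     txset = list(address_tx.values())
--     once_txs = [item for item,count in Counter(txset).items() if count ==1 ]
--     more_txs = set(txset)-set(once_txs)
--     more_txs_adds = defaultdict(list)
--     once_txs_adds = defaultdict(list)
--     for add,tx in address_tx.items():
--         if tx in more_txs:
--             more_txs_adds[tx].append(add)
--         else:
--             once_txs_adds[tx].append(add)
--     return more_txs_adds,once_txs_adds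
-- ===== SOURCE B (Python) =====
-- from collections import defaultdict
--
-- def transverse(address_tx):
--     groups = defaultdict(list)
--     for add, tx in address_tx.items():
--         groups[tx].append(add)
--     more_txs_adds = defaultdict(list)
--     once_txs_adds = defaultdict(list)
--     for tx, adds in groups.items():
--         if len(adds) > 1:
--             more_txs_adds[tx] = adds
--         else:
--             once_txs_adds[tx] = adds
--     return more_txs_adds, once_txs_adds
-- ===== Notes on version B (the rewrite author's own statement) =====
-- stated objective: simpler
-- what changed: B groups addresses by tx in one pass and partitions the groups by list length, replacing A's Counter/once-list/set-difference computation and the per-entry set-membership test.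
import Mathlib
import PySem

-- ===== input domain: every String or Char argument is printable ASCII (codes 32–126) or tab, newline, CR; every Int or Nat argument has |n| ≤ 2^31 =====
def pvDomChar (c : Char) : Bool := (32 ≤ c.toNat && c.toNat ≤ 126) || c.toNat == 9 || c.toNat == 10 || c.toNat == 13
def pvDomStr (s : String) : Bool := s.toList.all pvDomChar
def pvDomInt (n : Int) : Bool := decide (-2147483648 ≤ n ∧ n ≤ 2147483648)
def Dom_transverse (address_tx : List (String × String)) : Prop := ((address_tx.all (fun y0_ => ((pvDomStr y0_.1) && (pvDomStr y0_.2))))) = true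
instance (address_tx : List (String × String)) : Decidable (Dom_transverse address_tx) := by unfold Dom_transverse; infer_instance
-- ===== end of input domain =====

-- B groups addresses by tx in one pass and partitions the groups by list length, replacing A's
-- Counter/once-list/set-difference computation and the per-entry membership test (objective: simpler).

-- ===== PORT A =====
def transverse (address_tx : List (String × String)) : (List (String × List String)) × (List (String × List String)) :=
  let txset := address_tx.map (fun p => p.2)
  let once_txs := ((PySem.Dict.counter txset).items.filter (fun p => p.2 == (1 : Int))).map (fun p => p.1)
  let more_txs := PySem.Set.diff (PySem.Set.ofList txset) (PySem.Set.ofList once_txs)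
  let r := address_tx.foldl
    (fun (acc : PySem.Dict String (List String) × PySem.Dict String (List String)) p =>
      if more_txs.contains p.2 then (acc.1.modify p.2 [] (fun v => v ++ [p.1]), acc.2)
      else (acc.1, acc.2.modify p.2 [] (fun v => v ++ [p.1])))
    (PySem.Dict.empty, PySem.Dict.empty)
  (r.1.items, r.2.items)

-- ===== PORT B =====
def transverse_alt (address_tx : List (String × String)) : (List (String × List String)) × (List (String × List String)) :=
  let groups := address_tx.foldl
    (fun (d : PySem.Dict String (List String)) p => d.modify p.2 [] (fun v => v ++ [p.1]))
    PySem.Dict.empty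
  let r := groups.items.foldl
    (fun (acc : PySem.Dict String (List String) × PySem.Dict String (List String)) p =>
      if p.2.length > 1 then (acc.1.insert p.1 p.2, acc.2) else (acc.1, acc.2.insert p.1 p.2))
    (PySem.Dict.empty, PySem.Dict.empty)
  (r.1.items, r.2.items)

-- ===== PRECONDITION & SPEC =====
def Spec_transverse (address_tx : List (String × String)) (out : (List (String × List String)) × (List (String × List String))) : Prop := out = transverse_alt address_tx
instance (address_tx : List (String × String)) (out : (List (String × List String)) × (List (String × List String))) : Decidable (Spec_transverse address_tx out) := by unfold Spec_transverse; infer_instance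

-- ===== CLAIM (what is proved, stated in full; the proofs are below) =====
def Claim_equal_transverse : Prop := ∀ (address_tx : List (String × String)), Dom_transverse address_tx → Spec_transverse address_tx (transverse address_tx)

-- ===== LEMMAS AND PROOFS =====

-- the grouping fold both sides perform
def pvFM (l : List (String × String)) (d : PySem.Dict String (List String)) : PySem.Dict String (List String) :=
  l.foldl (fun d p => d.modify p.2 [] (fun v => v ++ [p.1])) d

-- closed formula for the items of the group dict built from empty
def pvG (l : List (String × String)) : List (String × List String) :=
  (PySem.Set.ofList (l.map (fun p => p.2))).map
    (fun k => (k, (l.filter (fun p => p.2 == k)).map (fun p => p.1)))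

-- A's two-dict fold splits into two independent grouping folds over key-filtered input
theorem pvPairFoldA (q : String → Bool) (l : List (String × String))
    (d1 d2 : PySem.Dict String (List String)) :
    l.foldl
      (fun (acc : PySem.Dict String (List String) × PySem.Dict String (List String)) p =>
        if q p.2 then (acc.1.modify p.2 [] (fun v => v ++ [p.1]), acc.2)
        else (acc.1, acc.2.modify p.2 [] (fun v => v ++ [p.1])))
      (d1, d2)
    = (pvFM (l.filter (fun p => q p.2)) d1, pvFM (l.filter (fun p => !q p.2)) d2) := by
  induction l generalizing d1 d2 with
  | nil => simp [pvFM]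
  | cons p t ih =>
    by_cases h : q p.2 = true <;> simp [pvFM, h, List.foldl_cons, ih]

-- B's two-dict fold splits into two independent insert folds over the filtered groups
theorem pvPairFoldB (l : List (String × List String))
    (d1 d2 : PySem.Dict String (List String)) :
    l.foldl
      (fun (acc : PySem.Dict String (List String) × PySem.Dict String (List String)) p =>
        if p.2.length > 1 then (acc.1.insert p.1 p.2, acc.2) else (acc.1, acc.2.insert p.1 p.2))
      (d1, d2)
    = ((l.filter (fun p => decide (p.2.length > 1))).foldl (fun d p => d.insert p.1 p.2) d1,
       (l.filter (fun p => !decide (p.2.length > 1))).foldl (fun d p => d.insert p.1 p.2) d2) := by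
  induction l generalizing d1 d2 with
  | nil => simp
  | cons p t ih =>
    by_cases h : p.2.length > 1 <;> simp [h, List.foldl_cons, ih]

-- the grouping fold keyed on the second component, rewritten via swap to PySem's key-first form
theorem pvFM_swap (l : List (String × String)) (d : PySem.Dict String (List String)) :
    l.foldl (fun d p => d.modify p.2 [] (fun v => v ++ [p.1])) d
    = (l.map (fun p => (p.2, p.1))).foldl (fun d p => d.modify p.1 [] (fun v => v ++ [p.2])) d := by
  rw [List.foldl_map]

theorem pvFM_getD (c : String) (l : List (String × String)) :
    (l.foldl (fun (d : PySem.Dict String (List String)) p => d.modify p.2 [] (fun v => v ++ [p.1])) PySem.Dict.empty).getD c []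
    = (l.filter (fun p => p.2 == c)).map (fun p => p.1) := by
  rw [pvFM_swap, PySem.Dict.getD_foldl_modify_append]
  simp [List.filter_map, Function.comp_def]

theorem pvFM_keys (l : List (String × String)) :
    (l.foldl (fun (d : PySem.Dict String (List String)) p => d.modify p.2 [] (fun v => v ++ [p.1])) PySem.Dict.empty).keys
    = PySem.Set.ofList (l.map (fun p => p.2)) := by
  rw [PySem.Dict.keys_foldl_modify_key]
  simp [PySem.Set.update_nil_left]

theorem pvFM_nodup (l : List (String × String)) :
    (l.foldl (fun (d : PySem.Dict String (List String)) p => d.modify p.2 [] (fun v => v ++ [p.1])) PySem.Dict.empty).keys.Nodup :=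
  PySem.Dict.nodup_keys_foldl_modify_key l (fun p => p.2) [] _ _ (by simp)

theorem pvFM_items (l : List (String × String)) :
    (l.foldl (fun (d : PySem.Dict String (List String)) p => d.modify p.2 [] (fun v => v ++ [p.1])) PySem.Dict.empty).items = pvG l := by
  rw [PySem.Dict.items_eq_map_keys _ (pvFM_nodup l) ([] : List String), pvFM_keys]
  apply List.map_congr_left
  intro k _
  rw [pvFM_getD]

-- ordered dedup commutes with filter
theorem pvFoldlAdd_filter (q : String → Bool) (xs : List String) (s : List String) :
    (xs.foldl PySem.Set.add s).filter q = (xs.filter q).foldl PySem.Set.add (s.filter q) := by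
  induction xs generalizing s with
  | nil => simp
  | cons x t ih =>
    by_cases h : q x = true
    · simp only [List.foldl_cons, List.filter_cons, h, if_pos]
      rw [ih]
      congr 1
      by_cases hm : x ∈ s
      · simp [PySem.Set.add, PySem.Set.contains, hm, List.mem_filter, h]
      · simp [PySem.Set.add, PySem.Set.contains, hm, List.mem_filter, List.filter_append, h]
    · simp only [List.foldl_cons, List.filter_cons, h]
      rw [ih]
      congr 1
      by_cases hm : x ∈ s
      · simp [PySem.Set.add, PySem.Set.contains, hm]
      · simp [PySem.Set.add, PySem.Set.contains, hm, List.filter_append, h]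

theorem pvOfList_filter (q : String → Bool) (xs : List String) :
    PySem.Set.ofList (xs.filter q) = (PySem.Set.ofList xs).filter q := by
  rw [PySem.Set.ofList_eq_foldl, PySem.Set.ofList_eq_foldl, pvFoldlAdd_filter]
  simp

-- pvG of a key-filtered input is the key-filter of pvG
theorem pvG_filter (q : String → Bool) (l : List (String × String)) :
    pvG (l.filter (fun p => q p.2)) = (pvG l).filter (fun p => q p.1) := by
  unfold pvG
  rw [List.filter_map]
  have h1 : (l.filter (fun p => q p.2)).map (fun p => p.2) = (l.map (fun p => p.2)).filter q := by
    rw [List.filter_map]; simp [Function.comp_def]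
  rw [h1, pvOfList_filter]
  apply List.map_congr_left
  intro k hk
  have hq : q k = true := (List.mem_filter.mp hk).2
  congr 1
  rw [List.filter_filter]
  congr 1
  apply List.filter_congr
  intro p _
  by_cases h : p.2 = k
  · simp [h, hq]
  · simp [h]

-- on every group, A's membership test 'tx in more_txs' agrees with B's 'len(adds) > 1'
theorem pvPred (l : List (String × String)) (p : String × List String) (hp : p ∈ pvG l) :
    (PySem.Set.diff (PySem.Set.ofList (l.map (fun p => p.2)))
       (PySem.Set.ofList (((PySem.Dict.counter (l.map (fun p => p.2))).items.filter
          (fun p => p.2 == (1 : Int))).map (fun p => p.1)))).contains p.1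
    = decide (p.2.length > 1) := by
  obtain ⟨k, hk, rfl⟩ := List.mem_map.mp hp
  have hmem : k ∈ l.map (fun p => p.2) := by
    simpa [PySem.Set.mem_ofList] using hk
  have hlen : ((l.filter (fun p => p.2 == k)).map (fun p => p.1)).length
      = (l.map (fun p => p.2)).count k := by
    simp [List.count, List.countP_map, Function.comp_def, List.countP_eq_length_filter.symm]
  have hpos : 0 < (l.map (fun p => p.2)).count k := List.count_pos_iff.mpr hmem
  simp only [PySem.Set.diff, PySem.Set.contains, PySem.Dict.items_counter]
  simp [List.mem_filter, hmem, hlen, List.mem_map, PySem.Set.mem_ofList]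
  obtain ⟨pp, hpl, hpk⟩ := List.mem_map.mp hmem
  constructor
  · intro h
    have hxl : (pp.1, k) ∈ l := by rw [← hpk]; simpa using hpl
    have := h pp.1 hxl
    omega
  · intro h x hx
    omega

-- insert-folding distinct fresh keys from empty reproduces the list
theorem pvInsertFold (l : List (String × List String)) (pr : String × List String → Bool)
    (hnd : (l.map (fun p => p.1)).Nodup) :
    ((l.filter pr).foldl (fun (d : PySem.Dict String (List String)) p => d.insert p.1 p.2) PySem.Dict.empty).items
    = l.filter pr := by
  have h1 : ∀ a ∈ l.filter pr, (PySem.Dict.empty : PySem.Dict String (List String)).contains ((fun p => p.1) a) = false := by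
    intro a _; simp [PySem.Dict.contains_empty]
  have h2 : ((l.filter pr).map (fun p => p.1)).Nodup :=
    (List.Sublist.map (fun p : String × List String => p.1) (List.filter_sublist (p := pr))).nodup hnd
  have := PySem.Dict.items_foldl_insert_fresh (l.filter pr) (fun p => p.1) (fun p => p.2)
    PySem.Dict.empty h1 h2
  simpa using this

theorem pvMain (l : List (String × String)) : transverse l = transverse_alt l := by
  simp only [transverse, transverse_alt]
  rw [pvPairFoldA (fun s =>
    (PySem.Set.diff (PySem.Set.ofList (l.map (fun p => p.2)))
      (PySem.Set.ofList (((PySem.Dict.counter (l.map (fun p => p.2))).items.filter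
        (fun p => p.2 == (1 : Int))).map (fun p => p.1)))).contains s)]
  rw [pvPairFoldB]
  have hGnd : ((pvG l).map (fun p => p.1)).Nodup := by
    have h := pvFM_nodup l
    rw [PySem.Dict.keys, pvFM_items] at h
    exact h
  simp only [pvFM]
  rw [pvFM_items l, pvFM_items (l.filter _), pvFM_items (l.filter _)]
  rw [pvG_filter, pvG_filter (fun s => !(PySem.Set.diff (PySem.Set.ofList (l.map (fun p => p.2)))
      (PySem.Set.ofList (((PySem.Dict.counter (l.map (fun p => p.2))).items.filter
        (fun p => p.2 == (1 : Int))).map (fun p => p.1)))).contains s)]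
  rw [pvInsertFold _ _ hGnd, pvInsertFold _ _ hGnd]
  simp only [Prod.mk.injEq]
  constructor
  · apply List.filter_congr
    intro p hp
    exact pvPred l p hp
  · apply List.filter_congr
    intro p hp
    rw [pvPred l p hp]

-- ===== VERDICT (by name: the statement is the Claim_ definition above) =====
theorem transverse_spec : Claim_equal_transverse := by
  intro address_tx _
  unfold Spec_transverse
  exact pvMain address_tx
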